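-- pv_equiv track=rewrite | github.com/Atayuksel/Coeus | data_interface.py | create_iob_tag_embeddings
-- ===== SOURCE A (Python) =====
-- def create_iob_tag_embeddings(candidate_relations):
--     iob_tag_embedding_map = {'pad': 0, 'unk': 1}
--     for candidate_relation in candidate_relations:
--         candidate_relation_tokens = candidate_relation[1]
--         candidate_relation_iob_tags = [x[2] for x in candidate_relation_tokens]
--         for iob_tag in candidate_relation_iob_tags:
--             if iob_tag not in iob_tag_embedding_map:
--                 iob_tag_embedding_map[iob_tag] = len(iob_tag_embedding_map)
--     return iob_tag_embedding_map
-- ===== SOURCE B (Python) =====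
-- def create_iob_tag_embeddings(candidate_relations):
--     # Rank-by-first-occurrence: collect the distinct tags as an (unordered) set,
--     # drop the seeded keys by set difference, then SORT the set by each tag's
--     # first position in the flattened tag stream and number them from 2 --
--     # a sort-based ranking instead of A's incremental len()-based assignment.
--     flat = [x[2] for cr in candidate_relations for x in cr[1]]
--     tags = sorted(set(flat) - {'pad', 'unk'}, key=flat.index)
--     result = {'pad': 0, 'unk': 1}
--     for i, t in enumerate(tags, 2):
--         result[t] = i
--     return result
-- ===== Notes on version B (the rewrite author's own statement) =====
-- stated objective: alternative
-- what changed: Replaces A's single interleaved pass that grows the dict and assigns each unseen tag len(dict) with a sort-based ranking: flatten the tags, take the set difference set(flat) - {'pad','unk'}, sort the remaining tags by their first position in the flattened stream (key=flat.index), and number them from 2.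
import Mathlib
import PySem

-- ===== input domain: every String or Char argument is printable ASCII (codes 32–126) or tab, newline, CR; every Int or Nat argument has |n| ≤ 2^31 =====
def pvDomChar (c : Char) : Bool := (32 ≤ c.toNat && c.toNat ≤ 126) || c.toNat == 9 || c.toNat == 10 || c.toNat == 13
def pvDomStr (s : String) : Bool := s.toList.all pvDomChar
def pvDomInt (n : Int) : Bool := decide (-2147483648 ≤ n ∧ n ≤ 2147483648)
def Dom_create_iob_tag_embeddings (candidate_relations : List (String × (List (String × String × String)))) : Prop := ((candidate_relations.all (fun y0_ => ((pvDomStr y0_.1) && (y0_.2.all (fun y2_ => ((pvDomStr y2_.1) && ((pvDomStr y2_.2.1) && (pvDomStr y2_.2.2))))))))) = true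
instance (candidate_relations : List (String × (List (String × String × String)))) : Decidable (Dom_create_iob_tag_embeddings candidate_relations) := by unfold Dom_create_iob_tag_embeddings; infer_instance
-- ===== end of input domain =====

-- B ranks the tags by sorting the deduplicated tag set by each tag's first position in the
-- flattened stream, instead of A's incremental len()-based insertion; same result, different
-- algorithm (sort-based ranking), not faster.

-- ===== PORT A =====
def create_iob_tag_embeddings (candidate_relations : List (String × (List (String × String × String)))) : List (String × Int) :=
  (candidate_relations.foldl
      (fun m candidate_relation =>
        let candidate_relation_tokens := candidate_relation.2
        let candidate_relation_iob_tags := candidate_relation_tokens.map (fun x => x.2.2)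
        candidate_relation_iob_tags.foldl
          (fun m iob_tag =>
            if m.contains iob_tag then m else m.insert iob_tag (m.size : Int)) m)
      ((PySem.Dict.empty.insert "pad" 0).insert "unk" 1)).items

-- ===== PORT B =====
-- flat.index(t): in Source B the key is only ever evaluated on members of flat, so the
-- ValueError branch of list.index is unreachable; ported as index? with getD 0.
def create_iob_tag_embeddings_alt (candidate_relations : List (String × (List (String × String × String)))) : List (String × Int) :=
  let flat := candidate_relations.flatMap (fun cr => cr.2.map (fun x => x.2.2))
  let tags := PySem.List.sorted (PySem.Set.diff (PySem.Set.ofList flat) ["pad", "unk"])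
      (fun t => (PySem.List.index? flat t).getD 0) false
  ("pad", 0) :: ("unk", 1) :: (PySem.List.enumerate tags 2).map (fun p => (p.2, p.1))

-- ===== PRECONDITION & SPEC =====
def Spec_create_iob_tag_embeddings (candidate_relations : List (String × (List (String × String × String)))) (out : List (String × Int)) : Prop := out = create_iob_tag_embeddings_alt candidate_relations
instance (candidate_relations : List (String × (List (String × String × String)))) (out : List (String × Int)) : Decidable (Spec_create_iob_tag_embeddings candidate_relations out) := by unfold Spec_create_iob_tag_embeddings; infer_instance

-- ===== CLAIM (what is proved, stated in full; the proofs are below) =====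
def Claim_equal_create_iob_tag_embeddings : Prop := ∀ (candidate_relations : List (String × (List (String × String × String)))), Dom_create_iob_tag_embeddings candidate_relations → Spec_create_iob_tag_embeddings candidate_relations (create_iob_tag_embeddings candidate_relations)

-- ===== LEMMAS AND PROOFS =====

theorem pvAnyBeq (L : List String) (t : String) : (L.any fun x => x == t) = decide (t ∈ L) := by
  induction L with
  | nil => simp
  | cons a l ih =>
    cases h : a == t
    · have h' : t ≠ a := fun e => by simp [e] at h
      simp [List.any_cons, ih, h, h']
    · have h' : t = a := (beq_iff_eq.mp h).symm
      simp [List.any_cons, h']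

/-- The dict A's loop maintains, as a function of the list `L` of new tags inserted so far. -/
def pvD (L : List String) : PySem.Dict String Int :=
  PySem.Dict.mk (("pad", 0) :: ("unk", 1) :: L.zipIdx.map (fun p => (p.1, (p.2 : Int) + 2)))

theorem pvD_contains (L : List String) (t : String) :
    (pvD L).contains t = (t == "pad" || t == "unk" || L.contains t) := by
  simp only [pvD, PySem.Dict.contains_mk, List.any_cons, List.any_map, List.contains_eq_mem]
  rw [show ((fun p : String × Int => p.1 == t) ∘ fun p : String × Nat => (p.1, (p.2:Int) + 2)) = ((fun x => x == t) ∘ Prod.fst) from rfl,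
    ← List.any_map, List.zipIdx_map_fst 0 L, pvAnyBeq, Bool.or_assoc]
  simp [BEq.comm (a := t)]

/-- A's loop body. -/
def pvStep (m : PySem.Dict String Int) (t : String) : PySem.Dict String Int :=
  if m.contains t then m else m.insert t (m.size : Int)

theorem pvStep_fresh (L : List String) (t : String)
    (h : (pvD L).contains t = false) : pvStep (pvD L) t = pvD (L ++ [t]) := by
  unfold pvStep
  rw [h]
  simp only [Bool.false_eq_true, if_false]
  apply PySem.Dict.ext
  rw [PySem.Dict.items_insert_of_not_contains _ _ h]
  simp [pvD, List.zipIdx_append, PySem.Dict.size]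
  omega

/-- Loop invariant: A's fold over the remaining tags extends the inserted-tag list by the
    first occurrences of the non-`pad`/`unk` tags it has not seen yet. -/
theorem pvInv (l : List String) : ∀ L : List String,
    l.foldl pvStep (pvD L) =
      pvD (PySem.Set.update L (l.filter (fun t => !(t == "pad" || t == "unk")))) := by
  induction l with
  | nil => intro L; simp [PySem.Set.update]
  | cons t l ih =>
    intro L
    rw [List.foldl_cons, List.filter_cons]
    by_cases hp : t = "pad"
    · simp only [pvStep, hp]
      simpa using ih L
    by_cases hu : t = "unk"
    · simp only [pvStep, hu]
      simpa using ih L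
    have hkeep : (!(t == "pad" || t == "unk")) = true := by simp [hp, hu]
    rw [hkeep, if_pos rfl]
    by_cases hm : t ∈ L
    · have hc : (pvD L).contains t = true := by
        simp [pvD_contains, List.contains_eq_mem, hm]
      have hadd : PySem.Set.add L t = L := by simp [PySem.Set.add, List.contains_eq_mem, hm]
      simp only [pvStep, hc, if_true, PySem.Set.update, List.foldl_cons, hadd]
      exact ih L
    · have hc : (pvD L).contains t = false := by
        simp [pvD_contains, List.contains_eq_mem, hm, hp, hu]
      have hadd : PySem.Set.add L t = L ++ [t] := by
        simp [PySem.Set.add, List.contains_eq_mem, hm]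
      rw [pvStep_fresh L t hc]
      simp only [PySem.Set.update, List.foldl_cons, hadd]
      exact ih (L ++ [t])

theorem pvFilterAdd (p : String → Bool) (s : List String) (x : String) (hx : p x = true) :
    (PySem.Set.add s x).filter p = PySem.Set.add (s.filter p) x := by
  by_cases hm : x ∈ s
  · have h1 : PySem.Set.add s x = s := by simp [PySem.Set.add, List.contains_eq_mem, hm]
    have h2 : PySem.Set.add (s.filter p) x = s.filter p := by
      simp [PySem.Set.add, List.contains_eq_mem, List.mem_filter, hm, hx]
    rw [h1, h2]
  · have h1 : PySem.Set.add s x = s ++ [x] := by simp [PySem.Set.add, List.contains_eq_mem, hm]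
    have h2 : PySem.Set.add (s.filter p) x = s.filter p ++ [x] := by
      simp [PySem.Set.add, List.contains_eq_mem, List.mem_filter, hm]
    rw [h1, h2, List.filter_append]
    simp [hx]

theorem pvFilterUpdate (p : String → Bool) (xs : List String) : ∀ s : List String,
    (PySem.Set.update s xs).filter p = PySem.Set.update (s.filter p) (xs.filter p) := by
  induction xs with
  | nil => intro s; simp [PySem.Set.update]
  | cons x xs ih =>
    intro s
    simp only [PySem.Set.update, List.foldl_cons] at *
    cases hx : p x
    · have h1 : (PySem.Set.add s x).filter p = s.filter p := by
        by_cases hm : x ∈ s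
        · simp [PySem.Set.add, List.contains_eq_mem, hm]
        · simp [PySem.Set.add, List.contains_eq_mem, hm, List.filter_append, hx]
      rw [List.filter_cons, hx]
      simp only [Bool.false_eq_true, if_false]
      rw [ih (PySem.Set.add s x), h1]
    · rw [List.filter_cons, hx, if_pos rfl, List.foldl_cons,
        ih (PySem.Set.add s x), pvFilterAdd p s x hx]

/-- Ordered dedup commutes with filter. -/
theorem pvOfListFilter (p : String → Bool) (xs : List String) :
    (PySem.Set.ofList xs).filter p = PySem.Set.ofList (xs.filter p) := by
  have := pvFilterUpdate p xs []
  simpa [PySem.Set.ofList_eq_foldl, PySem.Set.update] using this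

theorem pvEnumEq (xs : List String) : ∀ s : Int,
    PySem.List.enumerate xs s = xs.zipIdx.map (fun p => ((p.2:Int) + s, p.1)) := by
  induction xs with
  | nil => intro s; simp [PySem.List.enumerate]
  | cons x t ih =>
    intro s
    rw [show PySem.List.enumerate (x::t) s = (s, x) :: PySem.List.enumerate t (s+1) from rfl,
      ih (s+1), List.zipIdx_cons, List.zipIdx_succ]
    simp [Function.comp]
    intro a b _
    ring

/-- The set difference against the literal list is a filter. -/
theorem pvDiffFilter (s : List String) :
    PySem.Set.diff s ["pad", "unk"] = s.filter (fun t => !(t == "pad" || t == "unk")) := by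
  simp only [PySem.Set.diff]
  apply List.filter_congr
  intro x _
  by_cases h1 : x = "pad" <;> by_cases h2 : x = "unk" <;> simp [PySem.Set.contains, h1, h2]

/-- `set(xs)` lists elements in strictly increasing order of first occurrence. -/
theorem pvOfListIdxPairwise (xs : List String) :
    (PySem.Set.ofList xs).Pairwise
      (fun a b => ((PySem.List.index? xs a).getD 0) < ((PySem.List.index? xs b).getD 0)) := by
  induction xs using List.reverseRecOn with
  | nil => simp [PySem.Set.ofList]
  | append_singleton xs x ih =>
    rw [PySem.Set.ofList_append_singleton]
    by_cases hm : x ∈ PySem.Set.ofList xs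
    · rw [PySem.Set.add_of_mem hm]
      refine List.Pairwise.imp_of_mem ?_ ih
      intro a b ha hb h
      have ha' : a ∈ xs := (PySem.Set.mem_ofList _ _).mp ha
      have hb' : b ∈ xs := (PySem.Set.mem_ofList _ _).mp hb
      rwa [PySem.List.index?_append_of_mem _ ha', PySem.List.index?_append_of_mem _ hb']
    · rw [PySem.Set.add_of_not_mem hm, List.pairwise_append]
      have hx : x ∉ xs := fun h => hm ((PySem.Set.mem_ofList _ _).mpr h)
      refine ⟨?_, by simp, ?_⟩
      · refine List.Pairwise.imp_of_mem ?_ ih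
        intro a b ha hb h
        have ha' : a ∈ xs := (PySem.Set.mem_ofList _ _).mp ha
        have hb' : b ∈ xs := (PySem.Set.mem_ofList _ _).mp hb
        rwa [PySem.List.index?_append_of_mem _ ha', PySem.List.index?_append_of_mem _ hb']
      · intro a ha b hb
        have ha' : a ∈ xs := (PySem.Set.mem_ofList _ _).mp ha
        have hb' : b = x := by simpa using hb
        subst hb'
        rw [PySem.List.index?_append_of_mem _ ha', PySem.List.index?_append_singleton_self _ _ hx]
        obtain ⟨k, hk⟩ := Option.isSome_iff_exists.mp ((PySem.List.index?_isSome_iff _ _).mpr ha')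
        rw [hk]
        obtain ⟨hlt, -, -⟩ := PySem.List.getElem_of_index?_eq_some hk
        simpa using hlt

theorem pvFinal (crs : List (String × (List (String × String × String)))) :
    create_iob_tag_embeddings crs = create_iob_tag_embeddings_alt crs := by
  have hA : create_iob_tag_embeddings crs
      = ((crs.flatMap (fun cr => cr.2.map (fun x => x.2.2))).foldl pvStep (pvD [])).items := by
    unfold create_iob_tag_embeddings
    rw [List.foldl_flatMap]
    rfl
  set flat := crs.flatMap (fun cr => cr.2.map (fun x => x.2.2)) with hflat
  have hsorted : PySem.List.sorted (PySem.Set.diff (PySem.Set.ofList flat) ["pad", "unk"])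
      (fun t => (PySem.List.index? flat t).getD 0) false
      = (PySem.Set.ofList flat).filter (fun t => !(t == "pad" || t == "unk")) := by
    rw [pvDiffFilter]
    exact PySem.List.sorted_eq_self_of_pairwise _ _
      ((List.Pairwise.filter _ (pvOfListIdxPairwise flat)).imp (fun h => le_of_lt h))
  rw [hA, pvInv]
  dsimp only [create_iob_tag_embeddings_alt]
  rw [hsorted, pvOfListFilter, pvEnumEq]
  have h0 : PySem.Set.update ([] : List String)
      (flat.filter (fun t => !(t == "pad" || t == "unk")))
      = PySem.Set.ofList (flat.filter (fun t => !(t == "pad" || t == "unk"))) := rfl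
  rw [h0]
  simp [pvD, List.map_map, Function.comp]

-- ===== VERDICT (by name: the statement is the Claim_ definition above) =====
theorem create_iob_tag_embeddings_spec : Claim_equal_create_iob_tag_embeddings := by
  intro crs _
  exact pvFinal crs
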